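-- pv_equiv track=rewrite | github.com/IliesElJ/metalib | metalib/metadash/utils/log_utils.py | get_log_statistics
-- ===== SOURCE A (Python) =====
-- def get_log_statistics(log_content):
--     """
--     Calculate statistics from log content.
--
--     Args:
--         log_content: Raw log file content
--
--     Returns:
--         Dictionary with log statistics
--     """
--     if not log_content:
--         return {
--             "total_lines": 0,
--             "timestamp_markers": 0,
--             "errors": 0,
--             "warnings": 0
--         }
--
--     lines = log_content.split("\n")
--     total_lines = len([l for l in lines if l.strip()])
--
--     timestamp_markers = len([l for l in lines if "Last time in the index:" in l])
--     errors = len([l for l in lines if "error" in l.lower() or "failed" in l.lower()])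
--     warnings = len([l for l in lines if "warning" in l.lower()])
--
--     return {
--         "total_lines": total_lines,
--         "timestamp_markers": timestamp_markers,
--         "errors": errors,
--         "warnings": warnings
--     }
-- ===== SOURCE B (Python) =====
-- def get_log_statistics(log_content):
--     counts = {
--         "total_lines": 0,
--         "timestamp_markers": 0,
--         "errors": 0,
--         "warnings": 0
--     }
--     if not log_content:
--         return counts
--
--     def tally(chars):
--         line = "".join(chars)
--         low = line.lower()
--         if line.strip():
--             counts["total_lines"] += 1
--         if "Last time in the index:" in line:
--             counts["timestamp_markers"] += 1
--         if "error" in low or "failed" in low: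
--             counts["errors"] += 1
--         if "warning" in low:
--             counts["warnings"] += 1
--
--     buf = []
--     for ch in log_content:
--         if ch == "\n":
--             tally(buf)
--             buf = []
--         else:
--             buf.append(ch)
--     tally(buf)
--     return counts
-- ===== Notes on version B (the rewrite author's own statement) =====
-- stated objective: alternative
-- what changed: Replaces A's newline split plus four separate list-comprehension passes by a character-level streaming scan that never builds the list of lines: one walk over the characters buffers the current line and, at each line boundary and at the end, tallies the buffered line into the four counters at once.
import Mathlib
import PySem

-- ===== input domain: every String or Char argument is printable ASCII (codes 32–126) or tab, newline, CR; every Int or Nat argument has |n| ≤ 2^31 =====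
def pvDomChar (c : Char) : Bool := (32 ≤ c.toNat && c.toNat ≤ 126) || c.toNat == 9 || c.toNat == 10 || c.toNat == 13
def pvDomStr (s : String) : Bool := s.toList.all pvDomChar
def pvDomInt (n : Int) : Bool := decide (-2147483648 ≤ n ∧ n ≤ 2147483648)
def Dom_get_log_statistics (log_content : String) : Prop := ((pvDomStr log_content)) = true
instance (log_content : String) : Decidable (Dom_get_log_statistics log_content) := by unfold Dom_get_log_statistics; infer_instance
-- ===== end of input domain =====

-- B replaces A's split + four comprehension passes by one character-level streaming scan
-- that cuts out each line at '\n' itself and tallies it at once (objective: alternative).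

-- ===== PORT A =====
def get_log_statistics (log_content : String) : List (String × Int) :=
  if log_content = "" then
    [("total_lines", 0), ("timestamp_markers", 0), ("errors", 0), ("warnings", 0)]
  else
    let lines := (PySem.Str.split? log_content "\n").getD []
    let total_lines : Int := (lines.filter (fun l => PySem.Str.len (PySem.Str.strip l) != 0)).length
    let timestamp_markers : Int := (lines.filter (fun l => PySem.Str.isIn "Last time in the index:" l)).length
    let errors : Int := (lines.filter (fun l =>
        PySem.Str.isIn "error" (PySem.Str.lower l) || PySem.Str.isIn "failed" (PySem.Str.lower l))).length
    let warnings : Int := (lines.filter (fun l => PySem.Str.isIn "warning" (PySem.Str.lower l))).length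
    [("total_lines", total_lines), ("timestamp_markers", timestamp_markers),
     ("errors", errors), ("warnings", warnings)]

-- ===== PORT B =====
-- Source B's 'tally(buf)': close the buffered line, count it into the four counters
def pvTally (acc : Int × Int × Int × Int) (line : List Char) : Int × Int × Int × Int :=
  let low := PySem.Chars.lower line
  (acc.1 + (if PySem.Chars.len (PySem.Chars.strip line) ≠ 0 then 1 else 0),
   acc.2.1 + (if PySem.Chars.isIn "Last time in the index:".toList line then 1 else 0),
   acc.2.2.1 + (if PySem.Chars.isIn "error".toList low || PySem.Chars.isIn "failed".toList low then 1 else 0),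
   acc.2.2.2 + (if PySem.Chars.isIn "warning".toList low then 1 else 0))

-- Source B's 'for ch in log_content' loop, carrying the line buffer and the four counters
def pvScan : List Char → List Char → Int × Int × Int × Int → Int × Int × Int × Int
  | [], buf, acc => pvTally acc buf
  | c :: cs, buf, acc =>
    if c = '\n' then pvScan cs [] (pvTally acc buf) else pvScan cs (buf ++ [c]) acc

def get_log_statistics_alt (log_content : String) : List (String × Int) :=
  if log_content = "" then
    [("total_lines", 0), ("timestamp_markers", 0), ("errors", 0), ("warnings", 0)]
  else
    let r := pvScan log_content.toList [] (0, 0, 0, 0)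
    [("total_lines", r.1), ("timestamp_markers", r.2.1),
     ("errors", r.2.2.1), ("warnings", r.2.2.2)]

-- ===== PRECONDITION & SPEC =====
def Spec_get_log_statistics (log_content : String) (out : List (String × Int)) : Prop := out = get_log_statistics_alt log_content
instance (log_content : String) (out : List (String × Int)) : Decidable (Spec_get_log_statistics log_content out) := by unfold Spec_get_log_statistics; infer_instance

-- ===== CLAIM (what is proved, stated in full; the proofs are below) =====
def Claim_equal_get_log_statistics : Prop := ∀ (log_content : String), Dom_get_log_statistics log_content → Spec_get_log_statistics log_content (get_log_statistics log_content)

-- ===== LEMMAS AND PROOFS =====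

-- reference splitter: what splitting on a single '\n' produces, in B's traversal order
def pvSplit : List Char → List Char → List (List Char)
  | pre, [] => [pre]
  | pre, c :: cs => if c = '\n' then pre :: pvSplit [] cs else pvSplit (pre ++ [c]) cs

theorem pvPrefixOf_nl (c : Char) (rest : List Char) :
    ['\n'].isPrefixOf (c :: rest) = (c == '\n') := by
  by_cases h : c = '\n'
  · simp [List.isPrefixOf, h]
  · simp [List.isPrefixOf, h]
    exact fun h' => h h'.symm

theorem pvGo_eq (fuel : Nat) : ∀ (cs cur : List Char) (acc : List (List Char)),
    cs.length < fuel →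
    PySem.Chars.splitOn.go ['\n'] fuel cs cur acc = acc.reverse ++ pvSplit cur.reverse cs := by
  induction fuel with
  | zero => intro cs cur acc h; omega
  | succ n ih =>
    intro cs cur acc h
    match cs with
    | [] => rw [PySem.Chars.splitOn.go.eq_def]; simp [pvSplit]
    | c :: rest =>
      rw [PySem.Chars.splitOn.go.eq_def]
      simp only [pvPrefixOf_nl]
      by_cases hc : c = '\n'
      · simp only [hc, beq_self_eq_true, if_pos, List.length_cons, List.drop_succ_cons,
          List.length_nil, List.drop_zero]
        rw [ih rest [] (cur.reverse :: acc) (by simpa using Nat.lt_of_succ_lt_succ h)]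
        simp [pvSplit]
      · have : (c == '\n') = false := by simp [hc]
        simp only [this, Bool.false_eq_true, if_false]
        rw [ih rest (c :: cur) acc (by simpa using Nat.lt_of_succ_lt_succ h)]
        simp [pvSplit, hc]

theorem pvSplitOn_eq (cs : List Char) :
    PySem.Chars.splitOn cs ['\n'] = pvSplit [] cs := by
  unfold PySem.Chars.splitOn
  rw [pvGo_eq (cs.length + 1) cs [] [] (by omega)]
  simp

-- B's scan tallies exactly the pvSplit segments, in order
theorem pvScan_eq (cs : List Char) : ∀ (buf : List Char) (acc : Int × Int × Int × Int),
    pvScan cs buf acc = (pvSplit buf cs).foldl pvTally acc := by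
  induction cs with
  | nil => intro buf acc; simp [pvScan, pvSplit]
  | cons c rest ih =>
    intro buf acc
    by_cases hc : c = '\n' <;> simp [pvScan, pvSplit, hc, ih]

-- folding pvTally over any line list is the four independent counts
theorem pvFold_eq (L : List (List Char)) : ∀ (t ts e w : Int),
    L.foldl pvTally (t, ts, e, w)
      = (t + (L.countP (fun l => PySem.Chars.len (PySem.Chars.strip l) ≠ 0) : Int),
         ts + (L.countP (fun l => PySem.Chars.isIn "Last time in the index:".toList l) : Int),
         e + (L.countP (fun l => PySem.Chars.isIn "error".toList (PySem.Chars.lower l)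
                || PySem.Chars.isIn "failed".toList (PySem.Chars.lower l)) : Int),
         w + (L.countP (fun l => PySem.Chars.isIn "warning".toList (PySem.Chars.lower l)) : Int)) := by
  induction L with
  | nil => intro t ts e w; simp
  | cons hd tl ih =>
    intro t ts e w
    simp only [List.foldl_cons, List.countP_cons, pvTally]
    rw [ih]
    clear ih
    refine Prod.ext ?_ (Prod.ext ?_ (Prod.ext ?_ ?_)) <;> dsimp
    · simp only [decide_eq_true_eq]
      split_ifs <;> push_cast <;> ring
    · split_ifs <;> push_cast <;> ring
    · split_ifs <;> push_cast <;> ring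
    · split_ifs <;> push_cast <;> ring

-- ===== VERDICT (by name: the statement is the Claim_ definition above) =====
theorem get_log_statistics_spec : Claim_equal_get_log_statistics := by
  intro s _
  unfold Spec_get_log_statistics get_log_statistics get_log_statistics_alt
  by_cases h : s = ""
  · simp [h]
  · simp only [h, reduceIte]
    rw [pvScan_eq, ← pvSplitOn_eq, pvFold_eq]
    simp only [PySem.Str.split?, PySem.Chars.split?]
    simp [PySem.Str.len, PySem.Str.strip, PySem.Str.isIn, PySem.Str.lower]
    refine ⟨?_, ?_, ?_, ?_⟩ <;>
      rw [← List.countP_eq_length_filter, List.countP_map] <;>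
      exact List.countP_congr (fun l _ => by simp)
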